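-- pv_equiv track=rewrite | github.com/LaishaCalalpa/unique_chars | unique_chars.py | unique_chars
-- ===== SOURCE A (Python) =====
-- def unique_chars(str):
--     strList = str.split()
--     count = {}
--
--     for letter in strList:
--         if letter in count:
--             return False
--         else:
--             count[letter] = 1
--     return True
-- ===== SOURCE B (Python) =====
-- def unique_chars(str):
--     tokens = str.split()
--     return len(set(tokens)) == len(tokens)
-- ===== Notes on version B (the rewrite author's own statement) =====
-- stated objective: idiomatic
-- what changed: Replaces the per-token loop with an early-exit dict membership check by a single set construction and one length comparison.
import Mathlib
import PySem

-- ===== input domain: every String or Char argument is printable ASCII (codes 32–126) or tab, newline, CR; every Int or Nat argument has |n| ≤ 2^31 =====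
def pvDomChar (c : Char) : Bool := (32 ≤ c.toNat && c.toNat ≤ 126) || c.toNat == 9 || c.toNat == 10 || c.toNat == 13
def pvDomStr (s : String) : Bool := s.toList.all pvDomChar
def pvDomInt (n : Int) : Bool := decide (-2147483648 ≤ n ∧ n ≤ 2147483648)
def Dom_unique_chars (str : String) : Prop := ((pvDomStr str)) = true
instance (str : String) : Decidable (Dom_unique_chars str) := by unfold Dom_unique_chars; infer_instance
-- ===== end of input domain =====

-- B replaces A's per-token loop (dict membership, early return) by building the set of
-- tokens once and comparing its size to the token count (idiomatic; same cost).

-- ===== PORT A =====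
-- the for-loop over strList with early 'return False'
def ucLoopA : List String → PySem.Dict String Int → Bool
  | [], _ => true
  | letter :: rest, count =>
    if count.contains letter then false
    else ucLoopA rest (count.insert letter 1)

def unique_chars (str : String) : Bool :=
  ucLoopA (PySem.Str.split₀ str) PySem.Dict.empty

-- ===== PORT B =====
def unique_chars_alt (str : String) : Bool :=
  let tokens := PySem.Str.split₀ str
  (PySem.Set.ofList tokens).length == tokens.length

-- ===== PRECONDITION & SPEC =====
def Spec_unique_chars (str : String) (out : Bool) : Prop := out = unique_chars_alt str
instance (str : String) (out : Bool) : Decidable (Spec_unique_chars str out) := by unfold Spec_unique_chars; infer_instance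

-- ===== CLAIM (what is proved, stated in full; the proofs are below) =====
def Claim_equal_unique_chars : Prop := ∀ (str : String), Dom_unique_chars str → Spec_unique_chars str (unique_chars str)

-- ===== LEMMAS AND PROOFS =====

-- A's loop returns true iff the remaining tokens are distinct and none is already a key.
theorem ucLoopA_eq (ls : List String) (d : PySem.Dict String Int) :
    ucLoopA ls d = (decide ls.Nodup && ls.all (fun x => !d.contains x)) := by
  induction ls generalizing d with
  | nil => simp [ucLoopA]
  | cons x xs ih =>
    by_cases hc : d.contains x = true
    · simp [ucLoopA, hc]
    · simp only [Bool.not_eq_true] at hc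
      simp only [ucLoopA, hc, Bool.false_eq_true, if_false, ih, List.all_cons,
        List.nodup_cons, PySem.Dict.contains_insert, Bool.not_or,
        List.all_eq_true]
      by_cases hmem : x ∈ xs
      · have hall : xs.all (fun y => !(y == x) && !d.contains y) = false := by
          rw [List.all_eq_false]
          exact ⟨x, hmem, by simp⟩
        simp [hall, hmem]
      · have hall : xs.all (fun y => !(y == x) && !d.contains y)
            = xs.all (fun y => !d.contains y) := by
          apply Bool.eq_iff_iff.mpr
          simp only [List.all_eq_true, Bool.and_eq_true]
          constructor
          · intro H y hy; exact (H y hy).2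
          · intro H y hy
            refine ⟨?_, H y hy⟩
            simp only [Bool.not_eq_eq_eq_not, Bool.not_true, beq_eq_false_iff_ne]
            rintro rfl; exact hmem hy
        rw [hall]
        simp [hmem]

theorem length_ofList_eq_iff {α : Type} [BEq α] [LawfulBEq α] (xs : List α) :
    (PySem.Set.ofList xs).length = xs.length ↔ xs.Nodup := by
  constructor
  · intro h
    have hsub : ∀ a, a ∈ (PySem.Set.ofList xs : List α) → a ∈ xs := by
      intro a ha; exact (PySem.Set.mem_ofList xs a).mp ha
    have hsp : List.Subperm (PySem.Set.ofList xs : List α) xs :=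
      (PySem.Set.nodup_ofList xs).subperm hsub
    have hperm : List.Perm (PySem.Set.ofList xs : List α) xs :=
      hsp.perm_of_length_le (le_of_eq h.symm)
    exact hperm.nodup_iff.mp (PySem.Set.nodup_ofList xs)
  · intro h
    rw [PySem.Set.ofList_eq_self_of_nodup xs h]

-- ===== VERDICT (by name: the statement is the Claim_ definition above) =====
theorem unique_chars_spec : Claim_equal_unique_chars := by
  intro str _
  unfold Spec_unique_chars unique_chars unique_chars_alt
  rw [ucLoopA_eq]
  simp only [PySem.Dict.contains_empty, Bool.not_false, List.all_eq_true,
    implies_true, Bool.and_true]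
  by_cases h : (PySem.Str.split₀ str).Nodup
  · simp [h, (length_ofList_eq_iff _).mpr h]
  · simp only [h, decide_false]
    have : ¬ (PySem.Set.ofList (PySem.Str.split₀ str)).length = (PySem.Str.split₀ str).length :=
      fun he => h ((length_ofList_eq_iff _).mp he)
    simp [this]
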